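-- pv_equiv track=rewrite | github.com/dr3d/prethinker | src/medical_profile.py | _split_prolog_args
-- ===== SOURCE A (Python) =====
-- def _split_prolog_args(raw_args: str) -> list[str]:
--     args: list[str] = []
--     current: list[str] = []
--     quote = ""
--     depth = 0
--     for char in str(raw_args or ""):
--         if quote:
--             current.append(char)
--             if char == quote:
--                 quote = ""
--             continue
--         if char in {"'", '"'}:
--             quote = char
--             current.append(char)
--             continue
--         if char == "(":
--             depth += 1
--             current.append(char)
--             continue
--         if char == ")" and depth > 0:
--             depth -= 1
--             current.append(char)
--             continue
--         if char == "," and depth == 0: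
--             args.append("".join(current).strip())
--             current = []
--             continue
--         current.append(char)
--     tail = "".join(current).strip()
--     if tail:
--         args.append(tail)
--     return args
-- ===== SOURCE B (Python) =====
-- def _split_prolog_args(raw_args: str) -> list[str]:
--     # Mark-and-split: replace each top-level unquoted comma by a NUL sentinel
--     # in one pass, then split once on the sentinel (valid on printable input,
--     # which never contains NUL).
--     s = str(raw_args or "")
--     marked = []
--     quote = ""
--     depth = 0
--     for char in s:
--         if quote:
--             if char == quote:
--                 quote = ""
--             marked.append(char)
--         elif char in {"'", '"'}:
--             quote = char
--             marked.append(char)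
--         elif char == "(":
--             depth += 1
--             marked.append(char)
--         elif char == ")" and depth > 0:
--             depth -= 1
--             marked.append(char)
--         elif char == "," and depth == 0:
--             marked.append("\x00")
--         else:
--             marked.append(char)
--     parts = [piece.strip() for piece in "".join(marked).split("\x00")]
--     return parts if parts[-1] else parts[:-1]
-- ===== Notes on version B (the rewrite author's own statement) =====
-- stated objective: alternative
-- what changed: Instead of accumulating a current-segment buffer and an args list during the scan, B's scan only rewrites top-level unquoted commas to a NUL sentinel (never present in the printable input) and then produces the result with one split on the sentinel, a strip per piece, and dropping a trailing empty piece.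
import Mathlib
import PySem

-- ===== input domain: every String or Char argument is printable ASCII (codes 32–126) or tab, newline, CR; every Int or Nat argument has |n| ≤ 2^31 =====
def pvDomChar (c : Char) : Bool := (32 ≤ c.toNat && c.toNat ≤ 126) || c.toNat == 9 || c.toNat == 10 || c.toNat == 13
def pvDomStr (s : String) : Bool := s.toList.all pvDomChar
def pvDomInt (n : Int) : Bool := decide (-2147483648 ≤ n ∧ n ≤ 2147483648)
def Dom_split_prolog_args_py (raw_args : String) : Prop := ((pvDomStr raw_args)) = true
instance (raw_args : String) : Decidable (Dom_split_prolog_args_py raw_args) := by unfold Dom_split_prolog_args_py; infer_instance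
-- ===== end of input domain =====

-- B replaces A's segment-buffer accumulation by a mark-and-split pass (top-level
-- commas become a NUL sentinel, then one split + strip); objective: alternative
-- decomposition, same cost. NUL never occurs in the stated printable-ASCII domain.

-- ===== PORT A =====
-- state = (args, current, quote, depth); quote = none ports Python's quote == ""
def pvStepA (st : List String × List Char × Option Char × Nat) (c : Char) :
    List String × List Char × Option Char × Nat :=
  match st with
  | (args, cur, some qc, d) => (args, cur ++ [c], if c = qc then none else some qc, d)
  | (args, cur, none, d) =>
    if c = '\'' ∨ c = '"' then (args, cur ++ [c], some c, d)
    else if c = '(' then (args, cur ++ [c], none, d + 1)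
    else if c = ')' ∧ d > 0 then (args, cur ++ [c], none, d - 1)
    else if c = ',' ∧ d = 0 then (args ++ [String.ofList (PySem.Chars.strip cur)], [], none, d)
    else (args, cur ++ [c], none, d)

-- tail handling after the loop ("".join(current).strip(); append if truthy)
def pvFinA (st : List String × List Char × Option Char × Nat) : List String :=
  match st with
  | (args, cur, _, _) =>
    let tail := PySem.Chars.strip cur
    if tail = [] then args else args ++ [String.ofList tail]

-- str(raw_args or "") is the identity on str input, so the loop runs over raw_args itself
def split_prolog_args_py (raw_args : String) : List String :=
  pvFinA (raw_args.toList.foldl pvStepA (([], [], none, 0) : List String × List Char × Option Char × Nat))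

-- ===== PORT B =====
def pvNul : Char := Char.ofNat 0   -- the "\x00" sentinel

-- state = (quote, depth, marked)
def pvMarkStep (st : Option Char × Nat × List Char) (c : Char) : Option Char × Nat × List Char :=
  match st with
  | (some qc, d, out) => (if c = qc then none else some qc, d, out ++ [c])
  | (none, d, out) =>
    if c = '\'' ∨ c = '"' then (some c, d, out ++ [c])
    else if c = '(' then (none, d + 1, out ++ [c])
    else if c = ')' ∧ d > 0 then (none, d - 1, out ++ [c])
    else if c = ',' ∧ d = 0 then (none, d, out ++ [pvNul])
    else (none, d, out ++ [c])

-- "".join(marked).split("\x00") is ported as List.splitOn on the char list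
def split_prolog_args_py_alt (raw_args : String) : List String :=
  let marked := (raw_args.toList.foldl pvMarkStep ((none, 0, []) : Option Char × Nat × List Char)).2.2
  let parts := (marked.splitOn pvNul).map PySem.Chars.strip
  (if parts.getLastD [] = [] then parts.dropLast else parts).map String.ofList

-- ===== PRECONDITION & SPEC =====
def Spec_split_prolog_args_py (raw_args : String) (out : List String) : Prop := out = split_prolog_args_py_alt raw_args
instance (raw_args : String) (out : List String) : Decidable (Spec_split_prolog_args_py raw_args out) := by unfold Spec_split_prolog_args_py; infer_instance

-- ===== CLAIM (what is proved, stated in full; the proofs are below) =====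
def Claim_equal_split_prolog_args_py : Prop := ∀ (raw_args : String), Dom_split_prolog_args_py raw_args → Spec_split_prolog_args_py raw_args (split_prolog_args_py raw_args)

-- ===== LEMMAS AND PROOFS =====

-- the marked stream produced by B's scan, as a pure recursion (proof device)
def pvMarks : List Char → Option Char → Nat → List Char
  | [], _, _ => []
  | c :: cs, some qc, d => c :: pvMarks cs (if c = qc then none else some qc) d
  | c :: cs, none, d =>
    if c = '\'' ∨ c = '"' then c :: pvMarks cs (some c) d
    else if c = '(' then c :: pvMarks cs none (d + 1)
    else if c = ')' ∧ d > 0 then c :: pvMarks cs none (d - 1)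
    else if c = ',' ∧ d = 0 then pvNul :: pvMarks cs none d
    else c :: pvMarks cs none d

-- B's post-processing of a marked stream
def pvFinB (m : List Char) : List String :=
  let parts := (m.splitOn pvNul).map PySem.Chars.strip
  (if parts.getLastD [] = [] then parts.dropLast else parts).map String.ofList

lemma pvMarkFold_out (cs : List Char) : ∀ (q : Option Char) (d : Nat) (out : List Char),
    (List.foldl pvMarkStep (q, d, out) cs).2.2 = out ++ pvMarks cs q d := by
  induction cs with
  | nil => intro q d out; simp [pvMarks]
  | cons c cs ih =>
    intro q d out
    cases q with
    | some qc => simp [pvMarkStep, pvMarks, ih]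
    | none =>
      simp only [List.foldl_cons, pvMarkStep, pvMarks]
      split_ifs <;> simp [ih]

lemma pvSplitOn_no_nul (m : List Char) (h : pvNul ∉ m) : m.splitOn pvNul = [m] := by
  induction m with
  | nil => rfl
  | cons c cs ih =>
    have hc : (c == pvNul) = false :=
      beq_eq_false_iff_ne.2 (fun hx => h (hx ▸ List.mem_cons_self))
    have := ih (fun hm => h (List.mem_cons_of_mem _ hm))
    show (c :: cs).splitOnP (· == pvNul) = [c :: cs]
    rw [List.splitOnP_cons, hc]
    have h2 : cs.splitOnP (· == pvNul) = [cs] := this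
    simp [h2]

lemma pvSplitOn_cut (pre m : List Char) (h : pvNul ∉ pre) :
    (pre ++ pvNul :: m).splitOn pvNul = pre :: m.splitOn pvNul := by
  induction pre with
  | nil =>
    show (pvNul :: m).splitOnP (· == pvNul) = [] :: m.splitOnP (· == pvNul)
    rw [List.splitOnP_cons]; simp
  | cons c cs ih =>
    have hc : (c == pvNul) = false :=
      beq_eq_false_iff_ne.2 (fun hx => h (hx ▸ List.mem_cons_self))
    have ih' := ih (fun hm => h (List.mem_cons_of_mem _ hm))
    show ((c :: (cs ++ pvNul :: m)).splitOnP (· == pvNul)) = (c :: cs) :: m.splitOnP (· == pvNul)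
    rw [List.splitOnP_cons, hc]
    have h2 : (cs ++ pvNul :: m).splitOnP (· == pvNul) = cs :: m.splitOnP (· == pvNul) := ih'
    simp [h2]

lemma pvFinB_cut (cur m : List Char) (h : pvNul ∉ cur) :
    pvFinB (cur ++ pvNul :: m) = String.ofList (PySem.Chars.strip cur) :: pvFinB m := by
  unfold pvFinB
  rw [pvSplitOn_cut cur m h]
  have hne : (m.splitOn pvNul).map PySem.Chars.strip ≠ [] := by
    simp [List.splitOn, List.splitOnP_ne_nil]
  simp only [List.map_cons]
  rcases List.exists_cons_of_ne_nil hne with ⟨p, ps, hps⟩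
  rw [hps]
  by_cases hlast : (p :: ps).getLastD [] = []
  · simp at hlast ⊢
    simp [hlast]
  · simp at hlast ⊢
    simp [hlast]

-- main loop invariant: A's finished result from any state equals args ++ B's
-- post-processing of cur followed by the marks of the remaining input
lemma pvMain (cs : List Char) : ∀ (q : Option Char) (d : Nat) (args : List String) (cur : List Char),
    pvNul ∉ cur → pvNul ∉ cs →
    pvFinA (List.foldl pvStepA (args, cur, q, d) cs) = args ++ pvFinB (cur ++ pvMarks cs q d) := by
  induction cs with
  | nil =>
    intro q d args cur hcur _
    simp only [List.foldl_nil, pvMarks, List.append_nil, pvFinA, pvFinB]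
    rw [pvSplitOn_no_nul cur hcur]
    by_cases h : PySem.Chars.strip cur = [] <;> simp [h]
  | cons c cs ih =>
    intro q d args cur hcur hcs
    have hc : c ≠ pvNul := fun hx => hcs (hx ▸ List.mem_cons_self)
    have hcs' : pvNul ∉ cs := fun hm => hcs (List.mem_cons_of_mem _ hm)
    have hcur' : pvNul ∉ cur ++ [c] := by
      intro hm; rcases List.mem_append.1 hm with hm | hm
      · exact hcur hm
      · exact hc (List.mem_singleton.1 hm).symm
    cases q with
    | some qc =>
      simp only [List.foldl_cons, pvStepA, pvMarks]
      rw [ih _ _ _ _ hcur' hcs', List.append_assoc]; rfl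
    | none =>
      simp only [List.foldl_cons, pvStepA, pvMarks]
      split_ifs with h1 h2 h3 h4
      · rw [ih _ _ _ _ hcur' hcs', List.append_assoc]; rfl
      · rw [ih _ _ _ _ hcur' hcs', List.append_assoc]; rfl
      · rw [ih _ _ _ _ hcur' hcs', List.append_assoc]; rfl
      · rw [ih _ _ _ _ (by simp) hcs', pvFinB_cut cur _ hcur]
        simp
      · rw [ih _ _ _ _ hcur' hcs', List.append_assoc]; rfl

lemma pvAlt_eq_finB (raw_args : String) :
    split_prolog_args_py_alt raw_args = pvFinB (pvMarks raw_args.toList none 0) := by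
  unfold split_prolog_args_py_alt pvFinB
  rw [pvMarkFold_out]
  rfl

-- ===== VERDICT (by name: the statement is the Claim_ definition above) =====
theorem split_prolog_args_py_spec : Claim_equal_split_prolog_args_py := by
  intro raw_args hdom
  have hnul : pvNul ∉ raw_args.toList := by
    intro hm
    have := List.all_eq_true.1 hdom _ hm
    simp [pvDomChar, pvNul] at this
  show split_prolog_args_py raw_args = split_prolog_args_py_alt raw_args
  rw [pvAlt_eq_finB]
  have := pvMain raw_args.toList none 0 [] [] (by simp) hnul
  simpa using this
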